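-- pv_equiv track=rewrite | github.com/anelyausk/web-dev | lab7/codingbat/Logic-1/caught_speeding.py | caught_speeding
-- ===== SOURCE A (Python) =====
-- def caught_speeding(speed, is_birthday):
--   if not is_birthday:
--     if speed <= 60:
--       return 0
--     elif 61 <= speed <= 80:
--       return 1
--     elif speed >= 81:
--       return 2
--   return caught_speeding(speed-5, False)
-- ===== SOURCE B (Python) =====
-- def caught_speeding(speed, is_birthday):
--     s = speed - 5 * bool(is_birthday)
--     return (s > 60) + (s > 80)
-- ===== Notes on version B (the rewrite author's own statement) =====
-- stated objective: simpler
-- what changed: Replaces the recursive branch chain with a single birthday adjustment followed by an arithmetic sum of two threshold comparisons (no branches, no recursion).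
import Mathlib
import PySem

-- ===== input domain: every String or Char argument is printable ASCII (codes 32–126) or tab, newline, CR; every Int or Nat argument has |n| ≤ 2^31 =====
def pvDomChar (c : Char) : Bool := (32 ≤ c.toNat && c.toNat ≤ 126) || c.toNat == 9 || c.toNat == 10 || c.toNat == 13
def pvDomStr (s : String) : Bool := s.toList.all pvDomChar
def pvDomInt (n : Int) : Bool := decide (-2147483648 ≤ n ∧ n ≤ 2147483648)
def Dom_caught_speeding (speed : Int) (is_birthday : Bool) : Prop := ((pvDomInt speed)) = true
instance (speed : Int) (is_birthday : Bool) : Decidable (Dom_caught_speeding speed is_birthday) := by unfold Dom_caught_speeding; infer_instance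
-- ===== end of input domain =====

-- B replaces A's recursion and if/elif chain by one birthday adjustment and the sum of two threshold comparisons (objective: simpler).


-- ===== PORT A =====
-- Literal port of A. Python's fall-through recursion after the elif chain is unreachable
-- for integer speeds (the three branches cover all of Int), so that arm is closed by
-- False.elim; the recursive call from the is_birthday=true case is kept as in A.
def caught_speeding (speed : Int) (is_birthday : Bool) : Int :=
  match is_birthday with
  | false =>
    if _h1 : speed ≤ 60 then 0
    else if _h2 : 61 ≤ speed ∧ speed ≤ 80 then 1
    else if _h3 : 81 ≤ speed then 2
    else False.elim (by omega)
  | true => caught_speeding (speed - 5) false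
termination_by (if is_birthday then 1 else 0)
decreasing_by simp

-- ===== PORT B =====
def caught_speeding_alt (speed : Int) (is_birthday : Bool) : Int :=
  let s : Int := speed - 5 * (if is_birthday then 1 else 0)
  (if 60 < s then 1 else 0) + (if 80 < s then 1 else 0)

-- ===== PRECONDITION & SPEC =====
def Spec_caught_speeding (speed : Int) (is_birthday : Bool) (out : Int) : Prop := out = caught_speeding_alt speed is_birthday
instance (speed : Int) (is_birthday : Bool) (out : Int) : Decidable (Spec_caught_speeding speed is_birthday out) := by unfold Spec_caught_speeding; infer_instance

-- ===== CLAIM (what is proved, stated in full; the proofs are below) =====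
def Claim_equal_caught_speeding : Prop := ∀ (speed : Int) (is_birthday : Bool), Dom_caught_speeding speed is_birthday → Spec_caught_speeding speed is_birthday (caught_speeding speed is_birthday)

-- ===== LEMMAS AND PROOFS =====
theorem caught_speeding_false_eq (speed : Int) :
    caught_speeding speed false = caught_speeding_alt speed false := by
  unfold caught_speeding caught_speeding_alt
  dsimp only
  split_ifs <;> first | omega | (exfalso; omega)

-- ===== VERDICT (by name: the statement is the Claim_ definition above) =====
theorem caught_speeding_spec : Claim_equal_caught_speeding := by
  intro speed is_birthday _
  unfold Spec_caught_speeding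
  cases is_birthday
  · exact caught_speeding_false_eq speed
  · rw [caught_speeding, caught_speeding_false_eq]
    unfold caught_speeding_alt
    dsimp only
    split_ifs <;> first | omega | (exfalso; omega) | (exact absurd rfl (by assumption))
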